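-- pv_equiv track=rewrite | github.com/AnandVadgama/Linkedin-Outreach-automation | src/utils/helpers.py | create_prospect_tags
-- ===== SOURCE A (Python) =====
-- from typing import Dict, List, Optional
--
-- def create_prospect_tags(prospect_data: Dict) -> List[str]:
--     """Create relevant tags for a prospect based on their data."""
--     tags = []
--
--     # Role-based tags
--     headline = prospect_data.get("headline", "").lower()
--     if any(keyword in headline for keyword in ["ceo", "founder"]):
--         tags.append("decision_maker")
--     if any(keyword in headline for keyword in ["sales", "business development"]):
--         tags.append("sales")
--     if any(keyword in headline for keyword in ["marketing", "growth"]):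
--         tags.append("marketing")
--     if any(keyword in headline for keyword in ["engineer", "developer", "technical"]):
--         tags.append("technical")
--     if any(keyword in headline for keyword in ["hr", "people", "talent"]):
--         tags.append("hr")
--
--     # Industry tags
--     industry = prospect_data.get("industry", "").lower()
--     if "technology" in industry or "software" in industry:
--         tags.append("tech")
--     if "finance" in industry or "banking" in industry:
--         tags.append("finance")
--     if "healthcare" in industry or "medical" in industry:
--         tags.append("healthcare")
--
--     # Location tags
--     location = prospect_data.get("location", "").lower()
--     if any(city in location for city in ["san francisco", "silicon valley", "palo alto"]):
--         tags.append("silicon_valley")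
--     if any(city in location for city in ["new york", "nyc"]):
--         tags.append("new_york")
--     if any(city in location for city in ["london"]):
--         tags.append("london")
--
--     return tags
-- ===== SOURCE B (Python) =====
-- def create_prospect_tags(prospect_data):
--     """Create relevant tags via a dictionary-lookup substring scan (Rabin-Karp-style
--     position scan): walk every position of each field and look the candidate
--     substrings up in a keyword->tag table, collecting fired tags, then emit them
--     in the canonical tag order."""
--     KEYWORDS = {
--         "headline": {"ceo": "decision_maker", "founder": "decision_maker",
--                      "sales": "sales", "business development": "sales",
--                      "marketing": "marketing", "growth": "marketing",
--                      "engineer": "technical", "developer": "technical", "technical": "technical",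
--                      "hr": "hr", "people": "hr", "talent": "hr"},
--         "industry": {"technology": "tech", "software": "tech",
--                      "finance": "finance", "banking": "finance",
--                      "healthcare": "healthcare", "medical": "healthcare"},
--         "location": {"san francisco": "silicon_valley", "silicon valley": "silicon_valley",
--                      "palo alto": "silicon_valley",
--                      "new york": "new_york", "nyc": "new_york",
--                      "london": "london"},
--     }
--     ORDER = ["decision_maker", "sales", "marketing", "technical", "hr",
--              "tech", "finance", "healthcare", "silicon_valley", "new_york", "london"]
--     fired = set()
--     for field, table in KEYWORDS.items():
--         text = prospect_data.get(field, "").lower()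
--         lengths = sorted({len(k) for k in table})
--         for i in range(len(text)):
--             for L in lengths:
--                 if i + L <= len(text) and text[i:i + L] in table:
--                     fired.add(table[text[i:i + L]])
--     return [t for t in ORDER if t in fired]
-- ===== Notes on version B (the rewrite author's own statement) =====
-- stated objective: alternative
-- what changed: A tests each keyword with its own substring search over a chain of ifs; B instead scans each field position by position, looking the candidate substrings up in a keyword->tag dictionary, collects the fired tags in a set, and emits them in the canonical tag order.
import Mathlib
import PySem

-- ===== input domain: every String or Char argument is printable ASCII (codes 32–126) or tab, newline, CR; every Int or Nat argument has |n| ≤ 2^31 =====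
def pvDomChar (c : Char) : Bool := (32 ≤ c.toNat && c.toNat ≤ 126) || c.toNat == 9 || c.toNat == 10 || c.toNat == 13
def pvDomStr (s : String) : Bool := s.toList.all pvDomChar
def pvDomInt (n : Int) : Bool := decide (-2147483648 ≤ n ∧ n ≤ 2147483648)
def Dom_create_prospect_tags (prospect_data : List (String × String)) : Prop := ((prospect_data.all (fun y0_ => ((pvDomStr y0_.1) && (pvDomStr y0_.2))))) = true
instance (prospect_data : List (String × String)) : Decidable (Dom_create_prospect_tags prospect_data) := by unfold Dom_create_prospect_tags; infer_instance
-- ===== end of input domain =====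

-- B replaces A's per-keyword substring tests by a dictionary-lookup position scan:
-- it walks every position of each field, looks candidate substrings up in a
-- keyword→tag table collecting the fired tags as a set, and emits them in the
-- canonical tag order; objective: alternative (different algorithm, similar cost).

-- ===== PORT A =====
def create_prospect_tags (prospect_data : List (String × String)) : List String :=
  let tags : List String := []
  let headline := PySem.Str.lower ((PySem.Dict.mk prospect_data).getD "headline" "")
  let tags := if ["ceo", "founder"].any (fun kw => PySem.Str.isIn kw headline) then tags ++ ["decision_maker"] else tags
  let tags := if ["sales", "business development"].any (fun kw => PySem.Str.isIn kw headline) then tags ++ ["sales"] else tags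
  let tags := if ["marketing", "growth"].any (fun kw => PySem.Str.isIn kw headline) then tags ++ ["marketing"] else tags
  let tags := if ["engineer", "developer", "technical"].any (fun kw => PySem.Str.isIn kw headline) then tags ++ ["technical"] else tags
  let tags := if ["hr", "people", "talent"].any (fun kw => PySem.Str.isIn kw headline) then tags ++ ["hr"] else tags
  let industry := PySem.Str.lower ((PySem.Dict.mk prospect_data).getD "industry" "")
  let tags := if PySem.Str.isIn "technology" industry || PySem.Str.isIn "software" industry then tags ++ ["tech"] else tags
  let tags := if PySem.Str.isIn "finance" industry || PySem.Str.isIn "banking" industry then tags ++ ["finance"] else tags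
  let tags := if PySem.Str.isIn "healthcare" industry || PySem.Str.isIn "medical" industry then tags ++ ["healthcare"] else tags
  let location := PySem.Str.lower ((PySem.Dict.mk prospect_data).getD "location" "")
  let tags := if ["san francisco", "silicon valley", "palo alto"].any (fun city => PySem.Str.isIn city location) then tags ++ ["silicon_valley"] else tags
  let tags := if ["new york", "nyc"].any (fun city => PySem.Str.isIn city location) then tags ++ ["new_york"] else tags
  let tags := if ["london"].any (fun city => PySem.Str.isIn city location) then tags ++ ["london"] else tags
  tags

-- ===== PORT B =====
-- the keyword→tag tables (Python dict literals) and the canonical tag order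
def pvT1 : PySem.Dict String String := PySem.Dict.mk
  [("ceo","decision_maker"),("founder","decision_maker"),("sales","sales"),("business development","sales"),
   ("marketing","marketing"),("growth","marketing"),("engineer","technical"),("developer","technical"),
   ("technical","technical"),("hr","hr"),("people","hr"),("talent","hr")]
def pvT2 : PySem.Dict String String := PySem.Dict.mk
  [("technology","tech"),("software","tech"),("finance","finance"),("banking","finance"),
   ("healthcare","healthcare"),("medical","healthcare")]
def pvT3 : PySem.Dict String String := PySem.Dict.mk
  [("san francisco","silicon_valley"),("silicon valley","silicon_valley"),("palo alto","silicon_valley"),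
   ("new york","new_york"),("nyc","new_york"),("london","london")]
def pvTables : List (String × PySem.Dict String String) :=
  [("headline", pvT1), ("industry", pvT2), ("location", pvT3)]
def pvOrder : List String :=
  ["decision_maker","sales","marketing","technical","hr","tech","finance","healthcare","silicon_valley","new_york","london"]

def create_prospect_tags_alt (prospect_data : List (String × String)) : List String :=
  let fired : PySem.Set String :=
    pvTables.foldl (fun fired ft =>
      let text := PySem.Str.lower ((PySem.Dict.mk prospect_data).getD ft.1 "")
      let lengths := PySem.List.sorted (PySem.Set.ofList (ft.2.keys.map (fun k => (PySem.Str.len k : Int)))) (fun x => x) false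
      (PySem.List.pyRange 0 (PySem.Str.len text : Int) 1).foldl (fun fired i =>
        lengths.foldl (fun fired L =>
          if i + L ≤ (PySem.Str.len text : Int) ∧ ft.2.contains (PySem.Str.slice text (some i) (some (i + L))) = true then
            PySem.Set.add fired (ft.2.getD (PySem.Str.slice text (some i) (some (i + L))) "")
          else fired) fired) fired) PySem.Set.empty
  pvOrder.filter (fun t => PySem.Set.contains fired t)

-- ===== PRECONDITION & SPEC =====
def Spec_create_prospect_tags (prospect_data : List (String × String)) (out : List String) : Prop := out = create_prospect_tags_alt prospect_data
instance (prospect_data : List (String × String)) (out : List String) : Decidable (Spec_create_prospect_tags prospect_data out) := by unfold Spec_create_prospect_tags; infer_instance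

-- ===== CLAIM (what is proved, stated in full; the proofs are below) =====
def Claim_equal_create_prospect_tags : Prop := ∀ (prospect_data : List (String × String)), Dom_create_prospect_tags prospect_data → Spec_create_prospect_tags prospect_data (create_prospect_tags prospect_data)

-- ===== LEMMAS AND PROOFS =====

-- the lowered field text A and B both read
def pvText (pd : List (String × String)) (f : String) : String :=
  PySem.Str.lower ((PySem.Dict.mk pd).getD f "")

-- the candidate substring lengths B scans for a table
def pvLens (tbl : PySem.Dict String String) : List Int :=
  PySem.List.sorted (PySem.Set.ofList (tbl.keys.map (fun k => (PySem.Str.len k : Int)))) (fun x => x) false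

-- B's fired set, named for the proofs (definitionally the let-bound set in the port)
def pvFired (pd : List (String × String)) : PySem.Set String :=
  pvTables.foldl (fun fired ft =>
    let text := pvText pd ft.1
    let lengths := pvLens ft.2
    (PySem.List.pyRange 0 (PySem.Str.len text : Int) 1).foldl (fun fired i =>
      lengths.foldl (fun fired L =>
        if i + L ≤ (PySem.Str.len text : Int) ∧ ft.2.contains (PySem.Str.slice text (some i) (some (i + L))) = true then
          PySem.Set.add fired (ft.2.getD (PySem.Str.slice text (some i) (some (i + L))) "")
        else fired) fired) fired) PySem.Set.empty

theorem alt_eq_filter (pd : List (String × String)) :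
    create_prospect_tags_alt pd = pvOrder.filter (fun t => PySem.Set.contains (pvFired pd) t) := rfl

-- membership through a fold that conditionally adds
theorem mem_foldl_addIf {α β : Type} [BEq α] [LawfulBEq α] (P : β → Prop) [DecidablePred P] (g : β → α) :
    ∀ (l : List β) (acc : PySem.Set α) (y : α),
      (y ∈ l.foldl (fun a x => if P x then PySem.Set.add a (g x) else a) acc ↔ y ∈ acc ∨ ∃ x ∈ l, P x ∧ g x = y) := by
  intro l
  induction l with
  | nil => simp
  | cons x xs ih =>
    intro acc y
    by_cases h : P x
    · simp only [List.foldl_cons, if_pos h, ih, PySem.Set.mem_add, List.mem_cons]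
      constructor
      · rintro (⟨hy | hy⟩ | ⟨z, hz, hp, hg⟩)
        · exact Or.inl hy
        · exact Or.inr ⟨x, Or.inl rfl, h, hy.symm⟩
        · exact Or.inr ⟨z, Or.inr hz, hp, hg⟩
      · rintro (hy | ⟨z, (rfl | hz), hp, hg⟩)
        · exact Or.inl (Or.inl hy)
        · exact Or.inl (Or.inr hg.symm)
        · exact Or.inr ⟨z, hz, hp, hg⟩
    · simp only [List.foldl_cons, if_neg h, ih, List.mem_cons]
      constructor
      · rintro (hy | ⟨z, hz, hp, hg⟩)
        · exact Or.inl hy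
        · exact Or.inr ⟨z, Or.inr hz, hp, hg⟩
      · rintro (hy | ⟨z, (rfl | hz), hp, hg⟩)
        · exact Or.inl hy
        · exact absurd hp h
        · exact Or.inr ⟨z, hz, hp, hg⟩

-- membership through a fold whose step has a known membership characterisation
theorem mem_foldl_step {α β : Type} (F : PySem.Set α → β → PySem.Set α) (Q : β → α → Prop)
    (hF : ∀ a x y, y ∈ F a x ↔ y ∈ a ∨ Q x y) :
    ∀ (l : List β) (acc : PySem.Set α) (y : α), (y ∈ l.foldl F acc ↔ y ∈ acc ∨ ∃ x ∈ l, Q x y) := by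
  intro l
  induction l with
  | nil => simp
  | cons x xs ih =>
    intro acc y
    simp only [List.foldl_cons, ih, hF, List.mem_cons]
    constructor
    · rintro (⟨hy | hq⟩ | ⟨z, hz, hq⟩)
      · exact Or.inl hy
      · exact Or.inr ⟨x, Or.inl rfl, hq⟩
      · exact Or.inr ⟨z, Or.inr hz, hq⟩
    · rintro (hy | ⟨z, (rfl | hz), hq⟩)
      · exact Or.inl (Or.inl hy)
      · exact Or.inl (Or.inr hq)
      · exact Or.inr ⟨z, hz, hq⟩

-- the position scan over one field finds exactly the keywords occurring as substrings
theorem scan_iff (tbl : PySem.Dict String String) (text : String) (lengths : List Int)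
    (hlen : ∀ kw ∈ tbl.keys, ((PySem.Str.len kw : Int) ∈ lengths))
    (hpos : ∀ L ∈ lengths, (0:Int) ≤ L)
    (hne : ∀ kw ∈ tbl.keys, kw.toList ≠ [])
    (y : String) :
    (∃ i ∈ PySem.List.pyRange 0 (PySem.Str.len text : Int) 1, ∃ L ∈ lengths,
        ((i + L ≤ (PySem.Str.len text : Int) ∧
          tbl.contains (PySem.Str.slice text (some i) (some (i + L))) = true) ∧
         tbl.getD (PySem.Str.slice text (some i) (some (i + L))) "" = y)) ↔
    (∃ kw ∈ tbl.keys, PySem.Str.isIn kw text = true ∧ tbl.getD kw "" = y) := by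
  constructor
  · rintro ⟨i, hi, L, hL, ⟨⟨-, hcont⟩, hg⟩⟩
    have h0i : (0:Int) ≤ i := (PySem.List.mem_pyRange_one.mp hi).1
    have h0L : (0:Int) ≤ L := hpos L hL
    refine ⟨_, (PySem.Dict.contains_iff_mem_keys tbl _).mp hcont, ?_, hg⟩
    rw [PySem.Str.isIn_iff_infix]
    have hsl : (PySem.Str.slice text (some i) (some (i + L))).toList
        = (text.toList.drop i.toNat).take ((i + L).toNat - i.toNat) := by
      rw [PySem.Str.toList_slice]
      exact PySem.List.slice_toNat _ h0i (by omega)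
    rw [hsl]
    exact ((text.toList.drop i.toNat).take_prefix _).isInfix.trans
      (text.toList.drop_suffix i.toNat).isInfix
  · rintro ⟨kw, hkw, hIn, hg⟩
    obtain ⟨p, sfx, hps⟩ := (PySem.Str.isIn_iff_infix kw text).mp hIn
    have hslice : (PySem.Str.slice text (some (p.length:Int)) (some ((p.length:Int) + (PySem.Str.len kw : Int)))).toList
        = (text.toList.drop p.length).take kw.toList.length := by
      simp [PySem.Str.toList_slice, PySem.List.slice_natCast_add, PySem.Str.len_eq]
    have htake : (text.toList.drop p.length).take kw.toList.length = kw.toList := by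
      rw [← hps]; simp
    have hsl : PySem.Str.slice text (some (p.length:Int)) (some ((p.length:Int) + (PySem.Str.len kw : Int))) = kw :=
      String.toList_inj.mp (hslice.trans htake)
    have hle : p.length + kw.toList.length ≤ text.toList.length := by
      rw [← hps]; simp
    have hkw1 : 1 ≤ kw.toList.length := List.length_pos_iff.mpr (hne kw hkw)
    refine ⟨(p.length:Int), ?_, (PySem.Str.len kw : Int), hlen kw hkw, ⟨⟨?_, ?_⟩, ?_⟩⟩
    · rw [PySem.List.mem_pyRange_one]
      constructor
      · exact_mod_cast Int.natCast_nonneg p.length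
      · rw [PySem.Str.len_eq]; exact_mod_cast (by omega : p.length < text.toList.length)
    · rw [PySem.Str.len_eq, PySem.Str.len_eq]; exact_mod_cast hle
    · rw [hsl]; exact (PySem.Dict.contains_iff_mem_keys tbl kw).mpr hkw
    · rw [hsl]; exact hg

-- raw membership characterisation of B's fired set
theorem mem_fired_raw (pd : List (String × String)) (y : String) :
    y ∈ pvFired pd ↔ ∃ ft ∈ pvTables,
      (∃ i ∈ PySem.List.pyRange 0 (PySem.Str.len (pvText pd ft.1) : Int) 1, ∃ L ∈ pvLens ft.2,
        ((i + L ≤ (PySem.Str.len (pvText pd ft.1) : Int) ∧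
          ft.2.contains (PySem.Str.slice (pvText pd ft.1) (some i) (some (i + L))) = true) ∧
         ft.2.getD (PySem.Str.slice (pvText pd ft.1) (some i) (some (i + L))) "" = y)) := by
  have h := mem_foldl_step
    (F := fun fired ft =>
      (PySem.List.pyRange 0 (PySem.Str.len (pvText pd ft.1) : Int) 1).foldl (fun fired i =>
        (pvLens ft.2).foldl (fun fired L =>
          if i + L ≤ (PySem.Str.len (pvText pd ft.1) : Int) ∧ ft.2.contains (PySem.Str.slice (pvText pd ft.1) (some i) (some (i + L))) = true then
            PySem.Set.add fired (ft.2.getD (PySem.Str.slice (pvText pd ft.1) (some i) (some (i + L))) "")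
          else fired) fired) fired)
    (Q := fun ft y => ∃ i ∈ PySem.List.pyRange 0 (PySem.Str.len (pvText pd ft.1) : Int) 1, ∃ L ∈ pvLens ft.2,
        ((i + L ≤ (PySem.Str.len (pvText pd ft.1) : Int) ∧
          ft.2.contains (PySem.Str.slice (pvText pd ft.1) (some i) (some (i + L))) = true) ∧
         ft.2.getD (PySem.Str.slice (pvText pd ft.1) (some i) (some (i + L))) "" = y))
    (fun a ft z => by
      exact mem_foldl_step
        (F := fun fired i =>
          (pvLens ft.2).foldl (fun fired L =>
            if i + L ≤ (PySem.Str.len (pvText pd ft.1) : Int) ∧ ft.2.contains (PySem.Str.slice (pvText pd ft.1) (some i) (some (i + L))) = true then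
              PySem.Set.add fired (ft.2.getD (PySem.Str.slice (pvText pd ft.1) (some i) (some (i + L))) "")
            else fired) fired)
        (Q := fun i z => ∃ L ∈ pvLens ft.2,
          ((i + L ≤ (PySem.Str.len (pvText pd ft.1) : Int) ∧
            ft.2.contains (PySem.Str.slice (pvText pd ft.1) (some i) (some (i + L))) = true) ∧
           ft.2.getD (PySem.Str.slice (pvText pd ft.1) (some i) (some (i + L))) "" = z))
        (fun a i z => mem_foldl_addIf
          (P := fun L => i + L ≤ (PySem.Str.len (pvText pd ft.1) : Int) ∧ ft.2.contains (PySem.Str.slice (pvText pd ft.1) (some i) (some (i + L))) = true)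
          (g := fun L => ft.2.getD (PySem.Str.slice (pvText pd ft.1) (some i) (some (i + L))) "") _ a z)
        _ a z)
    pvTables PySem.Set.empty y
  rw [show pvFired pd = pvTables.foldl _ PySem.Set.empty from rfl] at *
  rw [h]
  simp [PySem.Set.empty]

-- keys and lookup values of the literal tables
theorem keys1 : pvT1.keys = ["ceo","founder","sales","business development","marketing","growth","engineer","developer","technical","hr","people","talent"] := by decide
theorem keys2 : pvT2.keys = ["technology","software","finance","banking","healthcare","medical"] := by decide
theorem keys3 : pvT3.keys = ["san francisco","silicon valley","palo alto","new york","nyc","london"] := by decide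

-- fired-set membership in terms of keyword occurrence (the scan eliminated)
theorem mem_fired_iff (pd : List (String × String)) (y : String) :
    y ∈ pvFired pd ↔
      (∃ kw ∈ pvT1.keys, PySem.Str.isIn kw (pvText pd "headline") = true ∧ pvT1.getD kw "" = y) ∨
      (∃ kw ∈ pvT2.keys, PySem.Str.isIn kw (pvText pd "industry") = true ∧ pvT2.getD kw "" = y) ∨
      (∃ kw ∈ pvT3.keys, PySem.Str.isIn kw (pvText pd "location") = true ∧ pvT3.getD kw "" = y) := by
  rw [mem_fired_raw]
  simp only [pvTables, List.mem_cons, List.not_mem_nil, or_false, exists_eq_or_imp, exists_eq_left]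
  rw [scan_iff pvT1 (pvText pd "headline") (pvLens pvT1) (by decide) (by decide) (by decide) y,
      scan_iff pvT2 (pvText pd "industry") (pvLens pvT2) (by decide) (by decide) (by decide) y,
      scan_iff pvT3 (pvText pd "location") (pvLens pvT3) (by decide) (by decide) (by decide) y]

-- A's eleven (condition, tag) pairs, conditions written exactly as A writes them
def pvAList (pd : List (String × String)) : List (Bool × String) :=
  [ (["ceo", "founder"].any (fun kw => PySem.Str.isIn kw (pvText pd "headline")), "decision_maker"),
    (["sales", "business development"].any (fun kw => PySem.Str.isIn kw (pvText pd "headline")), "sales"),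
    (["marketing", "growth"].any (fun kw => PySem.Str.isIn kw (pvText pd "headline")), "marketing"),
    (["engineer", "developer", "technical"].any (fun kw => PySem.Str.isIn kw (pvText pd "headline")), "technical"),
    (["hr", "people", "talent"].any (fun kw => PySem.Str.isIn kw (pvText pd "headline")), "hr"),
    (PySem.Str.isIn "technology" (pvText pd "industry") || PySem.Str.isIn "software" (pvText pd "industry"), "tech"),
    (PySem.Str.isIn "finance" (pvText pd "industry") || PySem.Str.isIn "banking" (pvText pd "industry"), "finance"),
    (PySem.Str.isIn "healthcare" (pvText pd "industry") || PySem.Str.isIn "medical" (pvText pd "industry"), "healthcare"),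
    (["san francisco", "silicon valley", "palo alto"].any (fun city => PySem.Str.isIn city (pvText pd "location")), "silicon_valley"),
    (["new york", "nyc"].any (fun city => PySem.Str.isIn city (pvText pd "location")), "new_york"),
    (["london"].any (fun city => PySem.Str.isIn city (pvText pd "location")), "london") ]

theorem pvG1_1 : pvT1.getD "ceo" "" = "decision_maker" := by decide
theorem pvG1_2 : pvT1.getD "founder" "" = "decision_maker" := by decide
theorem pvG1_3 : pvT1.getD "sales" "" = "sales" := by decide
theorem pvG1_4 : pvT1.getD "business development" "" = "sales" := by decide
theorem pvG1_5 : pvT1.getD "marketing" "" = "marketing" := by decide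
theorem pvG1_6 : pvT1.getD "growth" "" = "marketing" := by decide
theorem pvG1_7 : pvT1.getD "engineer" "" = "technical" := by decide
theorem pvG1_8 : pvT1.getD "developer" "" = "technical" := by decide
theorem pvG1_9 : pvT1.getD "technical" "" = "technical" := by decide
theorem pvG1_10 : pvT1.getD "hr" "" = "hr" := by decide
theorem pvG1_11 : pvT1.getD "people" "" = "hr" := by decide
theorem pvG1_12 : pvT1.getD "talent" "" = "hr" := by decide
theorem pvG2_1 : pvT2.getD "technology" "" = "tech" := by decide
theorem pvG2_2 : pvT2.getD "software" "" = "tech" := by decide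
theorem pvG2_3 : pvT2.getD "finance" "" = "finance" := by decide
theorem pvG2_4 : pvT2.getD "banking" "" = "finance" := by decide
theorem pvG2_5 : pvT2.getD "healthcare" "" = "healthcare" := by decide
theorem pvG2_6 : pvT2.getD "medical" "" = "healthcare" := by decide
theorem pvG3_1 : pvT3.getD "san francisco" "" = "silicon_valley" := by decide
theorem pvG3_2 : pvT3.getD "silicon valley" "" = "silicon_valley" := by decide
theorem pvG3_3 : pvT3.getD "palo alto" "" = "silicon_valley" := by decide
theorem pvG3_4 : pvT3.getD "new york" "" = "new_york" := by decide
theorem pvG3_5 : pvT3.getD "nyc" "" = "new_york" := by decide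
theorem pvG3_6 : pvT3.getD "london" "" = "london" := by decide

-- B's membership test agrees with A's condition on each of the eleven tags
theorem contains_fired (pd : List (String × String)) :
    ∀ p ∈ pvAList pd, PySem.Set.contains (pvFired pd) p.2 = p.1 := by
  intro p hp
  simp only [pvAList, List.mem_cons, List.not_mem_nil, or_false] at hp
  rcases hp with rfl|rfl|rfl|rfl|rfl|rfl|rfl|rfl|rfl|rfl|rfl <;>
    · apply Bool.coe_iff_coe.mp
      rw [PySem.Set.contains_iff, mem_fired_iff]
      simp only [keys1, keys2, keys3, List.mem_cons, List.not_mem_nil, or_false,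
        exists_eq_or_imp, exists_eq_left, pvG1_1, pvG1_2, pvG1_3, pvG1_4, pvG1_5, pvG1_6, pvG1_7, pvG1_8, pvG1_9, pvG1_10, pvG1_11, pvG1_12, pvG2_1, pvG2_2, pvG2_3, pvG2_4, pvG2_5, pvG2_6, pvG3_1, pvG3_2, pvG3_3, pvG3_4, pvG3_5, pvG3_6,
        List.any_cons, List.any_nil, Bool.or_eq_true, Bool.or_false]
      simp

-- A's if/append chain over a (condition, tag) list is a filterMap
theorem foldl_ifappend_eq_filterMap (l : List (Bool × String)) (acc : List String) :
    l.foldl (fun tags p => if p.1 then tags ++ [p.2] else tags) acc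
      = acc ++ l.filterMap (fun p => if p.1 then some p.2 else none) := by
  induction l generalizing acc with
  | nil => simp
  | cons p t ih =>
    obtain ⟨c, s⟩ := p
    by_cases hc : c <;> simp [hc, ih]

-- B's canonical-order filter is the same filterMap when the test agrees with the conditions
theorem filter_map_snd (l : List (Bool × String)) (pred : String → Bool)
    (h : ∀ p ∈ l, pred p.2 = p.1) :
    (l.map (fun p => p.2)).filter pred = l.filterMap (fun p => if p.1 then some p.2 else none) := by
  induction l with
  | nil => simp
  | cons p t ih =>
    have hp := h p (List.mem_cons_self)
    have ht := ih (fun q hq => h q (List.mem_cons_of_mem _ hq))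
    simp only [List.map_cons, List.filter_cons, List.filterMap_cons, hp, ht]
    cases p.1 <;> simp

set_option maxHeartbeats 1000000 in
theorem create_prospect_tags_eq (pd : List (String × String)) :
    create_prospect_tags pd = create_prospect_tags_alt pd := by
  have hA : create_prospect_tags pd
      = (pvAList pd).foldl (fun tags p => if p.1 then tags ++ [p.2] else tags) [] := by
    unfold create_prospect_tags pvAList pvText
    simp only [List.foldl_cons, List.foldl_nil]
  have hOrder : pvOrder = (pvAList pd).map (fun p => p.2) := rfl
  rw [hA, foldl_ifappend_eq_filterMap, List.nil_append, alt_eq_filter, hOrder,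
    filter_map_snd (pvAList pd) _ (contains_fired pd)]

-- ===== VERDICT (by name: the statement is the Claim_ definition above) =====
theorem create_prospect_tags_spec : Claim_equal_create_prospect_tags := by
  intro pd _
  unfold Spec_create_prospect_tags
  exact create_prospect_tags_eq pd
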